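-- pv_equiv track=rewrite | github.com/thumbe12856/competitive-programming | hacker_cup/2022/qualification_round/C2/solve.py | solve
-- ===== SOURCE A (Python) =====
-- can = [1, 2, 4, 8, 16, 32, 64, 128, 256]
--
-- def solve(N, C1):
--   root = {}
--   curr = root
--   for c in C1:
--     if c not in curr:
--       curr[c] = {}
--     curr = curr[c]
--   curr['#'] = {}
--
--   N2 = N << 1
--   d = 0
--   for i in range(1, len(can), 1):
--     if can[i - 1] < N2 <= can[i]:
--       d = i
--       break
--
--   ans = []
--   def dfs(curr_d, curr):
--     if len(ans) == N - 1:
--       return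
--
--     if curr_d == d:
--       ans.append(curr[:])
--       return
--
--     dfs(curr_d + 1, curr + '.')
--     dfs(curr_d + 1, curr + '-')
--
--   if C1[0] == '.':
--     dfs(1, '-')
--   else:
--     dfs(1, '.')
--
--   return ans
-- ===== SOURCE B (Python) =====
-- def solve(N, C1):
--   # counting rewrite: d such that 2^(d-1) < 2N <= 2^d, then output the first
--   # N-1 length-d strings ('.'<'-') starting with the flipped first char of C1
--   d = 1
--   while (1 << d) < N * 2:
--     d += 1
--   first = '-' if C1[0] == '.' else '.'
--   ans = []
--   for k in range(N - 1):
--     ans.append(first + ''.join('-' if (k >> (d - 2 - j)) & 1 else '.'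
--                                for j in range(d - 1)))
--   return ans
-- ===== Notes on version B (the rewrite author's own statement) =====
-- stated objective: simpler
-- what changed: Drops the dead trie and replaces the recursive early-exit DFS with a direct counting loop that writes the k-th length-d binary string ('.'=0, '-'=1, MSB first) for k = 0..N-2.
import Mathlib
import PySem

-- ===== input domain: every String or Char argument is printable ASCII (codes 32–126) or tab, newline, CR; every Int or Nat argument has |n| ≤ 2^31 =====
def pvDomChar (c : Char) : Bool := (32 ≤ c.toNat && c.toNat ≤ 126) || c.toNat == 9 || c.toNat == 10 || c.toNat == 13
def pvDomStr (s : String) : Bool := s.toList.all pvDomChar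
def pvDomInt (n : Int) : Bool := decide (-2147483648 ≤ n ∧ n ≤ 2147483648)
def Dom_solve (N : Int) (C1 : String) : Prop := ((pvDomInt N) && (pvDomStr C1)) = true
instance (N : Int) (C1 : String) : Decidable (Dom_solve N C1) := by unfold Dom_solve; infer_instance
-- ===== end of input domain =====

-- B replaces A's recursive DFS (and the dead trie) by a direct counting loop over k = 0..N-2; objective: simpler.

-- ===== PORT A =====
-- A's dict-of-dicts trie is built from the single word C1, so it is a linear chain;
-- it is dead code (never read) and is ported as the chain of its keys, exactly the values inserted.
def canA : List Int := [1, 2, 4, 8, 16, 32, 64, 128, 256]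

-- the 'for i in range(1, len(can), 1): … break' loop: acc = some d models the break
def findD (N2 : Int) : Int :=
  ((PySem.List.pyRange 1 9 1).foldl (fun acc i =>
    match acc with
    | some _ => acc
    | none =>
      if ((PySem.List.pyGet? canA (i - 1)).getD 0 < N2 ∧ N2 ≤ (PySem.List.pyGet? canA i).getD 0) then some i
      else none) none).getD 0

-- the nested dfs; fuel bounds the recursion depth (d - curr_d), it never cuts a run inside Pre_
def dfsA (N d : Int) (fuel : Nat) (currD : Int) (curr : String) (ans : List String) : List String :=
  if (ans.length : Int) = N - 1 then ans
  else if currD = d then ans ++ [curr]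
  else match fuel with
    | 0 => ans
    | fuel + 1 =>
      let ans := dfsA N d fuel (currD + 1) (curr ++ ".") ans
      dfsA N d fuel (currD + 1) (curr ++ "-") ans

def solve (N : Int) (C1 : String) : List String :=
  let _trie : List Char := C1.toList ++ ['#']   -- dead trie, see comment above
  let N2 := N * 2                               -- N << 1
  let d := findD N2
  match PySem.Str.pyGet? C1 0 with
  | none => []                                  -- C1[0] raises IndexError: excluded by Pre_
  | some c => if c = '.' then dfsA N d d.toNat 1 "-" [] else dfsA N d d.toNat 1 "." []

-- ===== PORT B =====
-- the 'while (1 << d) < N * 2' loop; fuel 64 covers every d reachable inside Dom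
def dLoopB (N2 : Int) : Int → Nat → Int
  | d, 0 => d
  | d, fuel + 1 => if (2 ^ d.toNat : Int) < N2 then dLoopB N2 (d + 1) fuel else d

def solve_alt (N : Int) (C1 : String) : List String :=
  let d := dLoopB (N * 2) 1 64
  match PySem.Str.pyGet? C1 0 with
  | none => []                                  -- C1[0] raises IndexError: excluded by Pre_
  | some c =>
    let first := if c = '.' then '-' else '.'
    (List.range (N - 1).toNat).map (fun (k : Nat) =>
      String.ofList (first :: (List.range (d - 1).toNat).map (fun (j : Nat) =>
        if (k >>> (d - 2 - (j : Int)).toNat) &&& 1 ≠ 0 then '-' else '.')))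

-- ===== PRECONDITION & SPEC =====
-- Pre_ excludes C1 = "" (A raises IndexError on C1[0]) and N outside 1..128
-- (there d stays 0 and A's dfs recurses past curr_d = d forever: RecursionError).
def Pre_solve (N : Int) (C1 : String) : Prop := 1 ≤ N ∧ N ≤ 128 ∧ C1 ≠ ""
instance (N : Int) (C1 : String) : Decidable (Pre_solve N C1) := by unfold Pre_solve; infer_instance
def pvWitness_solve : Int × String := (3, "--.")

def Spec_solve (N : Int) (C1 : String) (out : List String) : Prop := out = solve_alt N C1
instance (N : Int) (C1 : String) (out : List String) : Decidable (Spec_solve N C1 out) := by unfold Spec_solve; infer_instance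

-- ===== CLAIM (what is proved, stated in full; the proofs are below) =====
def Claim_equal_solve : Prop := ∀ (N : Int) (C1 : String), Dom_solve N C1 → Pre_solve N C1 → Spec_solve N C1 (solve N C1)

-- ===== LEMMAS AND PROOFS =====

-- the binary string of m on k bits, MSB first, '.' = 0 / '-' = 1
def bits (k m : Nat) : List Char :=
  (List.range k).map (fun j => if (m >>> (k - 1 - j)) &&& 1 ≠ 0 then '-' else '.')

-- all leaves of the depth-k subtree below prefix curr, in A's dfs order
def leaves : Nat → String → List String
  | 0, curr => [curr]
  | k + 1, curr => leaves k (curr ++ ".") ++ leaves k (curr ++ "-")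

lemma shift_add_pow (m k s : Nat) (hs : s < k) :
    (2 ^ k + m) >>> s = 2 ^ (k - s) + m >>> s := by
  have h2 : (2 : Nat) ^ k = 2 ^ (k - s) * 2 ^ s := by
    rw [← pow_add]; congr 1; omega
  simp only [Nat.shiftRight_eq_div_pow, h2]
  rw [Nat.add_comm, Nat.add_mul_div_right _ _ (Nat.two_pow_pos s)]
  omega

lemma bits_succ_low (k m : Nat) (hm : m < 2 ^ k) : bits (k + 1) m = '.' :: bits k m := by
  unfold bits
  rw [List.range_succ_eq_map, List.map_cons, List.map_map]
  congr 1
  · have : m >>> k = 0 := by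
      simp [Nat.shiftRight_eq_div_pow, Nat.div_eq_of_lt hm]
    simp [this]
  · apply List.map_congr_left
    intro j _
    have h : k - (j + 1) = k - 1 - j := by omega
    simp [Function.comp, h]

lemma bits_succ_high (k m : Nat) (hm : m < 2 ^ k) :
    bits (k + 1) (2 ^ k + m) = '-' :: bits k m := by
  unfold bits
  rw [List.range_succ_eq_map, List.map_cons, List.map_map]
  congr 1
  · have h1 : (2 ^ k + m) >>> k = 1 := by
      rw [Nat.shiftRight_eq_div_pow,
        show 2 ^ k + m = m + 1 * 2 ^ k by ring,
        Nat.add_mul_div_right _ _ (Nat.two_pow_pos k), Nat.div_eq_of_lt hm]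
    simp [h1]
  · apply List.map_congr_left
    intro j hj
    have hj' : j < k := List.mem_range.mp hj
    have hs : k - (j + 1) = k - 1 - j := by omega
    have h2 : (2 ^ k + m) >>> (k - 1 - j) = 2 ^ (k - (k - 1 - j)) + m >>> (k - 1 - j) :=
      shift_add_pow m k _ (by omega)
    have hev : 2 ^ (k - (k - 1 - j)) % 2 = 0 := by
      obtain ⟨t, ht⟩ : ∃ t, k - (k - 1 - j) = t + 1 := ⟨k - (k - 1 - j) - 1, by omega⟩
      rw [ht, pow_succ]
      simp
    have hand : (2 ^ k + m) >>> (k - 1 - j) &&& 1 = m >>> (k - 1 - j) &&& 1 := by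
      rw [h2, Nat.and_one_is_mod, Nat.and_one_is_mod]
      omega
    simp [Function.comp, hs, hand]

lemma leaves_eq (k : Nat) : ∀ curr : String,
    leaves k curr = (List.range (2 ^ k)).map (fun m => curr ++ String.ofList (bits k m)) := by
  induction k with
  | zero => intro curr; simp [leaves, bits]
  | succ k ih =>
    intro curr
    have hsplit : List.range (2 ^ (k + 1)) =
        List.range (2 ^ k) ++ (List.range (2 ^ k)).map (fun x => 2 ^ k + x) := by
      rw [pow_succ, Nat.mul_two, List.range_add]
    rw [leaves, ih, ih, hsplit, List.map_append, List.map_map]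
    congr 1
    · apply List.map_congr_left
      intro m hm
      rw [bits_succ_low k m (List.mem_range.mp hm)]
      apply String.toList_injective
      simp
    · apply List.map_congr_left
      intro m hm
      rw [Function.comp, bits_succ_high k m (List.mem_range.mp hm)]
      apply String.toList_injective
      simp

-- A's dfs returns ans extended by the first (N-1) - |ans| leaves below the current node
lemma dfs_take (N d : Int) (hN : 1 ≤ N) :
    ∀ (fuel : Nat) (currD : Int) (curr : String) (ans : List String),
      currD ≤ d → (d - currD).toNat ≤ fuel → ans.length ≤ (N - 1).toNat →
      dfsA N d fuel currD curr ans =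
        ans ++ (leaves (d - currD).toNat curr).take ((N - 1).toNat - ans.length) := by
  intro fuel
  induction fuel with
  | zero =>
    intro currD curr ans hle hfuel hans
    have hcd : currD = d := by omega
    have h0 : (d - currD).toNat = 0 := by omega
    rw [dfsA, h0]
    by_cases hfull : (ans.length : Int) = N - 1
    · have h1 : (N - 1).toNat - ans.length = 0 := by omega
      rw [if_pos hfull, h1, List.take_zero, List.append_nil]
    · have h1 : 1 ≤ (N - 1).toNat - ans.length := by omega
      rw [if_neg hfull, if_pos hcd, leaves, List.take_of_length_le (by simpa using h1)]
  | succ fuel ih =>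
    intro currD curr ans hle hfuel hans
    rw [dfsA]
    by_cases hfull : (ans.length : Int) = N - 1
    · have h1 : (N - 1).toNat - ans.length = 0 := by omega
      rw [if_pos hfull, h1, List.take_zero, List.append_nil]
    · by_cases hcd : currD = d
      · have h0 : (d - currD).toNat = 0 := by omega
        have h1 : 1 ≤ (N - 1).toNat - ans.length := by omega
        rw [if_neg hfull, if_pos hcd, h0, leaves,
          List.take_of_length_le (by simpa using h1)]
      · have hlt : currD < d := lt_of_le_of_ne hle hcd
        have hk : (d - currD).toNat = (d - (currD + 1)).toNat + 1 := by omega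
        simp only [hfull, hcd, if_false]
        rw [ih (currD + 1) (curr ++ ".") ans (by omega) (by omega) hans]
        rw [ih (currD + 1) (curr ++ "-") _ (by omega) (by omega)
          (by simp [List.length_take]; omega)]
        rw [hk, leaves]
        rw [List.take_append]
        simp only [List.append_assoc, List.length_append, List.length_take]
        congr 2
        congr 1
        omega

-- the cheap per-N arithmetic facts about both d computations, decided at once
set_option maxRecDepth 8000 in
lemma arith_facts : ∀ n ∈ List.range 128,
    findD (((n : Int) + 1) * 2) = dLoopB (((n : Int) + 1) * 2) 1 64 ∧
    1 ≤ findD (((n : Int) + 1) * 2) ∧ findD (((n : Int) + 1) * 2) ≤ 8 ∧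
    n ≤ 2 ^ ((findD (((n : Int) + 1) * 2)).toNat - 1) := by decide

-- both branches of the two ports agree, for an arbitrary fixed first character
lemma main_eq (N : Int) (hN1 : 1 ≤ N) (hN2 : N ≤ 128) (f : Char) :
    dfsA N (findD (N * 2)) (findD (N * 2)).toNat 1 (String.ofList [f]) [] =
      (List.range (N - 1).toNat).map (fun (k : Nat) =>
        String.ofList (f :: (List.range (dLoopB (N * 2) 1 64 - 1).toNat).map (fun (j : Nat) =>
          if (k >>> (dLoopB (N * 2) 1 64 - 2 - (j : Int)).toNat) &&& 1 ≠ 0 then '-' else '.'))) := by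
  have hn : N = ((N - 1).toNat : Int) + 1 := by omega
  obtain ⟨hAB, hd1, hd8, hcnt⟩ :=
    arith_facts (N - 1).toNat (List.mem_range.mpr (by omega))
  rw [← hn] at hAB hd1 hd8 hcnt
  set d := findD (N * 2) with hd
  rw [← hAB]
  have hK : (N - 1).toNat ≤ 2 ^ ((d.toNat) - 1) := by omega
  have hdd : (d - 1).toNat = d.toNat - 1 := by omega
  rw [dfs_take N d hN1 d.toNat 1 (String.ofList [f]) [] (by omega) (by omega) (by simp)]
  rw [show (d - (1:Int)).toNat = d.toNat - 1 from hdd] at *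
  rw [leaves_eq]
  simp only [List.nil_append, List.length_nil, Nat.sub_zero]
  rw [← List.map_take, List.take_range, min_eq_left hK]
  apply List.map_congr_left
  intro k hk
  show String.ofList [f] ++ String.ofList (bits (d.toNat - 1) k) = _
  rw [show String.ofList [f] ++ String.ofList (bits (d.toNat - 1) k)
      = String.ofList (f :: bits (d.toNat - 1) k) by
        apply String.toList_injective; simp]
  congr 1
  unfold bits
  rw [hdd]
  congr 1
  apply List.map_congr_left
  intro j hj
  have hj' : j < d.toNat - 1 := List.mem_range.mp hj
  have : (d - 2 - (j : Int)).toNat = d.toNat - 1 - 1 - j := by omega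
  rw [this]

-- ===== VERDICT (by name: the statement is the Claim_ definition above) =====
theorem solve_spec : Claim_equal_solve := by
  intro N C1 _ hPre
  obtain ⟨hN1, hN2, hne⟩ := hPre
  unfold Spec_solve solve solve_alt
  obtain ⟨c, r, hC⟩ : ∃ c r, C1.toList = c :: r := by
    cases h : C1.toList with
    | nil => exact absurd (by simpa using congrArg String.ofList h) hne
    | cons c r => exact ⟨c, r, rfl⟩
  have hget : PySem.Str.pyGet? C1 0 = some c := by
    rw [show (0 : Int) = ((0 : Nat) : Int) from rfl, PySem.Str.pyGet?_natCast, hC]; rfl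
  rw [hget]
  by_cases hc : c = '.'
  · simp only [hc]
    have := main_eq N hN1 hN2 '-'
    simpa using this
  · simp only [if_neg hc]
    have := main_eq N hN1 hN2 '.'
    simpa using this
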